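-- pv_equiv track=rewrite | github.com/MarwanElkhallouki/BAP | work/python/evaluation/metrics.py | _match_alarms_to_onsets
-- ===== SOURCE A (Python) =====
-- def _match_alarms_to_onsets(
--     alarm_indices: list[int],
--     drift_onsets: list[int],
--     tolerance: int,
-- ) -> list[int | None]:
--     """Match each alarm to at most one drift onset (and vice versa)."""
--     claimed = set()
--     matched_onsets: list[int | None] = []
--     for idx in alarm_indices:
--         matched_onset: int | None = None
--         for onset in drift_onsets:
--             if onset not in claimed and onset <= idx < onset + tolerance:
--                 claimed.add(onset)
--                 matched_onset = onset
--                 break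
--         matched_onsets.append(matched_onset)
--     return matched_onsets
-- ===== SOURCE B (Python) =====
-- def _bisect_right(a, x):
--     lo = 0
--     hi = len(a)
--     while lo < hi:
--         mid = (lo + hi) // 2
--         if a[mid] <= x:
--             lo = mid + 1
--         else:
--             hi = mid
--     return lo
--
--
-- def _match_alarms_to_onsets(
--     alarm_indices: list[int],
--     drift_onsets: list[int],
--     tolerance: int,
-- ) -> list[int | None]:
--     """Match each alarm to at most one drift onset (and vice versa).
--
--     Sorted distinct onsets + binary search: an alarm's window is a contiguous
--     run of the sorted distinct onset values; pick the unclaimed one appearing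
--     earliest in drift_onsets, then mark it claimed with a sentinel position.
--     """
--     first_pos = {}
--     for i, v in enumerate(drift_onsets):
--         if v not in first_pos:
--             first_pos[v] = i
--     vals = sorted(first_pos)
--     pos = [first_pos[v] for v in vals]
--     claimed_mark = len(drift_onsets)
--     out = []
--     for idx in alarm_indices:
--         lo = _bisect_right(vals, idx - tolerance)
--         hi = _bisect_right(vals, idx)
--         best = claimed_mark
--         best_j = -1
--         for j in range(lo, hi):
--             if pos[j] < best:
--                 best = pos[j]
--                 best_j = j
--         if best_j >= 0:
--             out.append(vals[best_j])
--             pos[best_j] = claimed_mark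
--         else:
--             out.append(None)
--     return out
-- ===== Notes on version B (the rewrite author's own statement) =====
-- stated objective: faster
-- what changed: Replaces the per-alarm linear rescan of drift_onsets with a precomputed first-occurrence index over the sorted distinct onset values: each alarm binary-searches its tolerance window (a contiguous run of the sorted values) and takes the minimum-position unclaimed value there, claiming by sentinel overwrite.
import Mathlib
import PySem

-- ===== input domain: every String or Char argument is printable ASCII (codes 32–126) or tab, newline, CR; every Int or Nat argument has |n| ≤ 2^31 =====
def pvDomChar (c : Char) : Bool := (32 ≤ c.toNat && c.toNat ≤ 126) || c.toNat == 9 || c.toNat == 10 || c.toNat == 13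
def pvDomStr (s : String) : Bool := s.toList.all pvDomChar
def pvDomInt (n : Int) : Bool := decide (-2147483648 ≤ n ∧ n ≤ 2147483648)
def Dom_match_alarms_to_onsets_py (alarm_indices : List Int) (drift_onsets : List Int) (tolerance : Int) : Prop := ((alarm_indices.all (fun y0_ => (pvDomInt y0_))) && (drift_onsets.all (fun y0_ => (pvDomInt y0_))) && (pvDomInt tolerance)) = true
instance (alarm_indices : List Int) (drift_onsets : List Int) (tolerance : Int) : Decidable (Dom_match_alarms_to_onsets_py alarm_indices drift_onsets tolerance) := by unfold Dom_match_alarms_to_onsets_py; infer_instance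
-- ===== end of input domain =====

-- B replaces A's per-alarm rescan of drift_onsets by binary search over the sorted distinct
-- onset values plus a first-occurrence position table with sentinel deletion.

-- ===== PORT A =====
-- inner 'for onset in drift_onsets: … break' loop of A
def aFind (claimed : PySem.Set Int) (drift_onsets : List Int) (idx tolerance : Int) : Option Int :=
  match drift_onsets with
  | [] => none
  | onset :: rest =>
    if onset ∉ claimed ∧ onset ≤ idx ∧ idx < onset + tolerance then some onset
    else aFind claimed rest idx tolerance

def match_alarms_to_onsets_py (alarm_indices : List Int) (drift_onsets : List Int) (tolerance : Int) : List (Option Int) :=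
  (alarm_indices.foldl (fun (st : PySem.Set Int × List (Option Int)) idx =>
      match aFind st.1 drift_onsets idx tolerance with
      | some onset => (PySem.Set.add st.1 onset, st.2 ++ [some onset])
      | none => (st.1, st.2 ++ [none]))
    (PySem.Set.empty, [])).2

-- ===== PORT B =====
-- hand-written _bisect_right of Source B; a[mid] as pyGetD is exact here: every call keeps
-- 0 <= mid < hi <= len a; the fuel hi - lo bounds the while loop's iterations (each step shrinks hi - lo)
def bBisectAux (a : List Int) (x : Int) : Nat → Nat → Nat → Nat
  | 0, lo, _hi => lo
  | fuel + 1, lo, hi =>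
    if lo < hi then
      if PySem.List.pyGetD a (((lo + hi) / 2 : Nat) : Int) 0 ≤ x then
        bBisectAux a x fuel ((lo + hi) / 2 + 1) hi
      else bBisectAux a x fuel lo ((lo + hi) / 2)
    else lo

def bBisect (a : List Int) (x : Int) (lo hi : Nat) : Nat := bBisectAux a x (hi - lo) lo hi

def match_alarms_to_onsets_py_alt (alarm_indices : List Int) (drift_onsets : List Int) (tolerance : Int) : List (Option Int) :=
  let first_pos := (PySem.List.enumerate drift_onsets).foldl
      (fun (d : PySem.Dict Int Int) p => if d.contains p.2 then d else d.insert p.2 p.1)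
      PySem.Dict.empty
  let vals := PySem.List.sorted (PySem.Dict.keys first_pos) (fun v => v)
  -- first_pos[v]: exact as getD, every v in vals is a key of first_pos
  let pos := vals.map (fun v => PySem.Dict.getD first_pos v 0)
  let claimed_mark : Int := (drift_onsets.length : Int)
  (alarm_indices.foldl (fun (st : List Int × List (Option Int)) idx =>
      let lo := bBisect vals (idx - tolerance) 0 vals.length
      let hi := bBisect vals idx 0 vals.length
      let sel := (PySem.List.pyRange (lo : Int) (hi : Int) 1).foldl
          (fun (bb : Int × Int) j =>
            if PySem.List.pyGetD st.1 j 0 < bb.1 then (PySem.List.pyGetD st.1 j 0, j) else bb)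
          (claimed_mark, -1)
      if sel.2 ≥ 0 then
        (PySem.List.pySetD st.1 sel.2 claimed_mark, st.2 ++ [some (PySem.List.pyGetD vals sel.2 0)])
      else (st.1, st.2 ++ [none]))
    (pos, [])).2

-- ===== PRECONDITION & SPEC =====
def Spec_match_alarms_to_onsets_py (alarm_indices : List Int) (drift_onsets : List Int) (tolerance : Int) (out : List (Option Int)) : Prop := out = match_alarms_to_onsets_py_alt alarm_indices drift_onsets tolerance
instance (alarm_indices : List Int) (drift_onsets : List Int) (tolerance : Int) (out : List (Option Int)) : Decidable (Spec_match_alarms_to_onsets_py alarm_indices drift_onsets tolerance out) := by unfold Spec_match_alarms_to_onsets_py; infer_instance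

-- ===== CLAIM (what is proved, stated in full; the proofs are below) =====
def Claim_equal_match_alarms_to_onsets_py : Prop := ∀ (alarm_indices : List Int) (drift_onsets : List Int) (tolerance : Int), Dom_match_alarms_to_onsets_py alarm_indices drift_onsets tolerance → Spec_match_alarms_to_onsets_py alarm_indices drift_onsets tolerance (match_alarms_to_onsets_py alarm_indices drift_onsets tolerance)

-- ===== LEMMAS AND PROOFS =====

-- A's inner loop: no candidate
theorem aFind_eq_none_iff (c : PySem.Set Int) (o : List Int) (idx t : Int) :
    aFind c o idx t = none ↔ ∀ v ∈ o, ¬(v ∉ c ∧ v ≤ idx ∧ idx < v + t) := by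
  induction o with
  | nil => simp [aFind]
  | cons a l ih =>
    by_cases h : a ∉ c ∧ a ≤ idx ∧ idx < a + t
    · simp only [aFind, if_pos h]
      constructor
      · intro hc; cases hc
      · intro hall; exact absurd h (hall a (List.mem_cons_self))
    · simp only [aFind, if_neg h, ih]
      constructor
      · intro hall v hv
        rcases List.mem_cons.mp hv with rfl | hv'
        · exact h
        · exact hall v hv'
      · intro hall v hv; exact hall v (List.mem_cons_of_mem _ hv)

-- A's inner loop: first candidate in list order = candidate of minimal first position
theorem aFind_some_spec (c : PySem.Set Int) (o : List Int) (idx t v : Int)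
    (h : aFind c o idx t = some v) :
    v ∈ o ∧ (v ∉ c ∧ v ≤ idx ∧ idx < v + t) ∧
      ∀ u ∈ o, (u ∉ c ∧ u ≤ idx ∧ idx < u + t) → o.idxOf v ≤ o.idxOf u := by
  induction o with
  | nil => cases h
  | cons a l ih =>
    by_cases hc : a ∉ c ∧ a ≤ idx ∧ idx < a + t
    · simp only [aFind, if_pos hc, Option.some.injEq] at h
      subst h
      refine ⟨List.mem_cons_self, hc, ?_⟩
      intro u _ _
      simp [List.idxOf_cons_self]
    · simp only [aFind, if_neg hc] at h
      obtain ⟨hvl, hcand, hmin⟩ := ih h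
      have hva : v ≠ a := by rintro rfl; exact hc hcand
      refine ⟨List.mem_cons_of_mem _ hvl, hcand, ?_⟩
      intro u hu hcu
      have hua : u ≠ a := by rintro rfl; exact hc hcu
      have hul : u ∈ l := by
        rcases List.mem_cons.mp hu with rfl | h'
        · exact absurd rfl hua
        · exact h'
      rw [List.idxOf_cons_ne _ (Ne.symm hva), List.idxOf_cons_ne _ (Ne.symm hua)]
      exact Nat.succ_le_succ (hmin u hul hcu)

-- index? of a member is its idxOf
theorem index?_of_mem (l : List Int) (v : Int) (h : v ∈ l) :
    PySem.List.index? l v = some (l.idxOf v) := by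
  induction l with
  | nil => cases h
  | cons a l ih =>
    by_cases hv : a = v
    · subst hv
      rw [PySem.List.index?_cons_self, List.idxOf_cons_self]
    · have hvl : v ∈ l := by
        rcases List.mem_cons.mp h with rfl | h'
        · exact absurd rfl hv
        · exact h'
      rw [PySem.List.index?_cons_of_ne l hv, ih hvl, List.idxOf_cons_ne l hv]
      rfl

-- the first_pos dict-building fold
def fpStep : PySem.Dict Int Int → (Int × Int) → PySem.Dict Int Int :=
  fun d p => if d.contains p.2 then d else d.insert p.2 p.1

theorem fp_keys (l : List Int) : ∀ (s : Int) (d : PySem.Dict Int Int),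
    ((PySem.List.enumerate l s).foldl fpStep d).keys = PySem.Set.update d.keys l := by
  induction l with
  | nil => intro s d; simp [PySem.List.enumerate_nil, PySem.Set.update]
  | cons x xs ih =>
    intro s d
    rw [PySem.List.enumerate_cons, List.foldl_cons]
    have hstep : (fpStep d (s, x)).keys = PySem.Set.add d.keys x := by
      by_cases h : d.contains x = true
      · have hx : x ∈ d.keys := (PySem.Dict.contains_iff_mem_keys d x).mp h
        simp [fpStep, h, PySem.Set.add, PySem.Set.contains, hx]
      · have hx : x ∉ d.keys := fun hm => h ((PySem.Dict.contains_iff_mem_keys d x).mpr hm)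
        simp only [fpStep, h, Bool.false_eq_true, if_false]
        rw [PySem.Dict.keys_insert_of_not_contains d s (by simpa using h)]
        simp [PySem.Set.add, PySem.Set.contains, hx]
    rw [ih (s + 1) (fpStep d (s, x))]
    simp [PySem.Set.update, hstep]

theorem fp_get? (l : List Int) : ∀ (s : Int) (d : PySem.Dict Int Int) (v : Int),
    ((PySem.List.enumerate l s).foldl fpStep d).get? v =
      if d.contains v then d.get? v
      else (PySem.List.index? l v).map (fun k => s + (k : Int)) := by
  induction l with
  | nil =>
    intro s d v
    simp only [PySem.List.enumerate_nil, List.foldl_nil]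
    by_cases h : d.contains v = true
    · rw [if_pos h]
    · rw [if_neg h]
      have h0 : PySem.List.index? ([] : List Int) v = none :=
        (PySem.List.index?_eq_none_iff _ _).mpr (by simp)
      rw [h0]
      simpa using (PySem.Dict.get?_eq_none_iff_contains d v).mpr (by simpa using h)
  | cons x xs ih =>
    intro s d v
    rw [PySem.List.enumerate_cons, List.foldl_cons, ih]
    by_cases hxv : x = v
    · subst hxv
      by_cases h : d.contains x = true
      · rw [if_pos (show (fpStep d (s, x)).contains x = true by simp [fpStep, h]),
            if_pos h]
        simp [fpStep, h]
      · have h1 : (fpStep d (s, x)).contains x = true := by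
          simp [fpStep, h, PySem.Dict.contains_insert_self]
        rw [if_pos h1, if_neg h]
        have h2 : (fpStep d (s, x)).get? x = some s := by
          simp only [fpStep, h, Bool.false_eq_true, if_false]
          exact PySem.Dict.get?_insert_self d x s
        rw [h2, PySem.List.index?_cons_self]
        simp
    · have hcont : (fpStep d (s, x)).contains v = d.contains v := by
        by_cases h : d.contains x = true
        · simp [fpStep, h]
        · simp only [fpStep, h, Bool.false_eq_true, if_false]
          rw [PySem.Dict.contains_insert]
          have hbe : (v == x) = false := by
            simp only [beq_eq_false_iff_ne, ne_eq]
            exact fun e => hxv e.symm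
          rw [hbe, Bool.false_or]
      rw [hcont]
      by_cases h : d.contains v = true
      · rw [if_pos h, if_pos h]
        by_cases hx : d.contains x = true
        · simp [fpStep, hx]
        · simp only [fpStep, hx, Bool.false_eq_true, if_false]
          exact PySem.Dict.get?_insert_of_ne d s (fun e => hxv e.symm)
      · rw [if_neg h, if_neg h, PySem.List.index?_cons_of_ne xs hxv]
        cases hidx : PySem.List.index? xs v with
        | none => simp
        | some k =>
          simp [Nat.cast_add, Nat.cast_one, add_comm, add_assoc, add_left_comm]

-- total getD as getElem
theorem getD_eq_getElem' (l : List Int) (i : Nat) (d : Int) (h : i < l.length) :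
    l.getD i d = l[i] := by
  rw [List.getD_eq_getElem?_getD, List.getElem?_eq_getElem h]
  rfl

-- the element at a member's first index is the member
theorem getElem_idxOf_mem (l : List Int) (v : Int) (h : v ∈ l) :
    ∃ (hk : List.idxOf v l < l.length), l[List.idxOf v l] = v := by
  have h1 := index?_of_mem l v h
  obtain ⟨hk, he, _⟩ := PySem.List.getElem_of_index?_eq_some h1
  exact ⟨hk, he⟩

-- binary search specification
theorem bBisectAux_spec (a : List Int) (x : Int) (hs : a.Pairwise (· ≤ ·)) :
    ∀ (fuel lo hi : Nat), hi - lo ≤ fuel → lo ≤ hi → hi ≤ a.length →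
    (∀ i (_ : i < a.length), i < lo → a[i] ≤ x) →
    (∀ i (_ : i < a.length), hi ≤ i → x < a[i]) →
    ((∀ i (_ : i < a.length), i < bBisectAux a x fuel lo hi → a[i] ≤ x) ∧
     (∀ i (_ : i < a.length), bBisectAux a x fuel lo hi ≤ i → x < a[i]) ∧
     bBisectAux a x fuel lo hi ≤ a.length) := by
  have mono : ∀ i j (hi : i < a.length) (hj : j < a.length), i ≤ j → a[i] ≤ a[j] := by
    intro i j hi hj hij
    rcases Nat.lt_or_ge i j with hlt | hge
    · exact List.pairwise_iff_getElem.mp hs i j hi hj hlt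
    · have : i = j := Nat.le_antisymm hij hge
      subst this; exact le_refl _
  intro fuel
  induction fuel with
  | zero =>
    intro lo hi hf hb hlen h3 h4
    have : lo = hi := by omega
    subst this
    exact ⟨fun i hi' => h3 i hi', fun i hi' => h4 i hi', hlen⟩
  | succ fuel ih =>
    intro lo hi hf hb hlen h3 h4
    simp only [bBisectAux]
    by_cases h : lo < hi
    · rw [if_pos h]
      have hmlen : (lo + hi) / 2 < a.length := by omega
      have hgd : PySem.List.pyGetD a ((((lo + hi) / 2 : Nat)) : Int) 0 = a[(lo + hi) / 2] := by
        rw [PySem.List.pyGetD_natCast]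
        exact getD_eq_getElem' a _ 0 hmlen
      by_cases hle : PySem.List.pyGetD a ((((lo + hi) / 2 : Nat)) : Int) 0 ≤ x
      · rw [if_pos hle]
        rw [hgd] at hle
        exact ih ((lo + hi) / 2 + 1) hi (by omega) (by omega) hlen
          (fun i hi' hlt => le_trans (mono i ((lo + hi) / 2) hi' hmlen (by omega)) hle) h4
      · rw [if_neg hle]
        rw [hgd] at hle
        push_neg at hle
        exact ih lo ((lo + hi) / 2) (by omega) (by omega) (by omega) h3
          (fun i hi' hge => lt_of_lt_of_le hle (mono ((lo + hi) / 2) i hmlen hi' hge))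
    · rw [if_neg h]
      have : lo = hi := by omega
      subst this
      exact ⟨fun i hi' => h3 i hi', fun i hi' => h4 i hi', hlen⟩

theorem bBisect_full (a : List Int) (x : Int) (hs : a.Pairwise (· ≤ ·)) :
    (∀ i (_ : i < a.length), i < bBisect a x 0 a.length → a[i] ≤ x) ∧
    (∀ i (_ : i < a.length), bBisect a x 0 a.length ≤ i → x < a[i]) ∧
    bBisect a x 0 a.length ≤ a.length := by
  have h := bBisectAux_spec a x hs (a.length - 0) 0 a.length (by omega) (by omega) (le_refl _)
    (fun i _ h => absurd h (Nat.not_lt_zero i)) (fun i hi h => absurd hi (by omega))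
  simpa only [bBisect] using h

-- the selection fold
def selStep (g : Int → Int) : (Int × Int) → Int → (Int × Int) :=
  fun bb j => if g j < bb.1 then (g j, j) else bb

theorem sel_none (g : Int → Int) (l : List Int) (bb : Int × Int)
    (h : ∀ j ∈ l, ¬ g j < bb.1) : l.foldl (selStep g) bb = bb := by
  induction l with
  | nil => rfl
  | cons a l ih =>
    rw [List.foldl_cons]
    have : selStep g bb a = bb := if_neg (h a List.mem_cons_self)
    rw [this]
    exact ih (fun j hj => h j (List.mem_cons_of_mem _ hj))

theorem sel_some (g : Int → Int) (l : List Int) (jstar : Int) :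
    ∀ (bb : Int × Int), jstar ∈ l → g jstar < bb.1 →
    (∀ j ∈ l, j ≠ jstar → g jstar < g j) →
    l.foldl (selStep g) bb = (g jstar, jstar) := by
  induction l with
  | nil => intro bb hmem; cases hmem
  | cons a l ih =>
    intro bb hmem hbb hmin
    rw [List.foldl_cons]
    by_cases ha : a = jstar
    · subst ha
      rw [show selStep g bb a = (g a, a) from if_pos hbb]
      apply sel_none
      intro j hj
      by_cases hja : j = a
      · subst hja; exact lt_irrefl _
      · exact not_lt.mpr (le_of_lt (hmin j (List.mem_cons_of_mem _ hj) hja))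
    · have hmem' : jstar ∈ l := by
        rcases List.mem_cons.mp hmem with rfl | h'
        · exact absurd rfl ha
        · exact h'
      by_cases hga : g a < bb.1
      · rw [show selStep g bb a = (g a, a) from if_pos hga]
        exact ih (g a, a) hmem' (hmin a List.mem_cons_self ha)
          (fun j hj => hmin j (List.mem_cons_of_mem _ hj))
      · rw [show selStep g bb a = bb from if_neg hga]
        exact ih bb hmem' hbb (fun j hj => hmin j (List.mem_cons_of_mem _ hj))

-- the two loop bodies as named functions (definitionally the ports' lambdas)
def aStep (o : List Int) (t : Int) :
    (PySem.Set Int × List (Option Int)) → Int → (PySem.Set Int × List (Option Int)) :=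
  fun st idx =>
    match aFind st.1 o idx t with
    | some onset => (PySem.Set.add st.1 onset, st.2 ++ [some onset])
    | none => (st.1, st.2 ++ [none])

def bStep (vals : List Int) (mark t : Int) :
    (List Int × List (Option Int)) → Int → (List Int × List (Option Int)) :=
  fun st idx =>
    let lo := bBisect vals (idx - t) 0 vals.length
    let hi := bBisect vals idx 0 vals.length
    let sel := (PySem.List.pyRange (lo : Int) (hi : Int) 1).foldl
        (fun (bb : Int × Int) j =>
          if PySem.List.pyGetD st.1 j 0 < bb.1 then (PySem.List.pyGetD st.1 j 0, j) else bb)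
        (mark, -1)
    if sel.2 ≥ 0 then
      (PySem.List.pySetD st.1 sel.2 mark, st.2 ++ [some (PySem.List.pyGetD vals sel.2 0)])
    else (st.1, st.2 ++ [none])

-- invariant tying A's claimed set to B's position table
def BInv (o vals : List Int) (claimed : PySem.Set Int) (p : List Int) : Prop :=
  p.length = vals.length ∧
  ∀ j (h : j < vals.length),
    p.getD j 0 = if vals[j] ∈ claimed then (o.length : Int) else (o.idxOf vals[j] : Int)

-- per-alarm step equivalence
theorem step_eq (o : List Int) (t : Int) (vals : List Int)
    (hlt : vals.Pairwise (· < ·)) (hvm : ∀ v, v ∈ vals ↔ v ∈ o)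
    (claimed : PySem.Set Int) (p : List Int) (idx : Int) (acc : List (Option Int))
    (hinv : BInv o vals claimed p) :
    ∃ out claimed' p',
      aStep o t (claimed, acc) idx = (claimed', acc ++ [out]) ∧
      bStep vals (o.length : Int) t (p, acc) idx = (p', acc ++ [out]) ∧
      BInv o vals claimed' p' := by
  obtain ⟨hlen, hp⟩ := hinv
  have hnd : vals.Nodup := hlt.imp (fun h => ne_of_lt h)
  have hinj : ∀ m1 m2 (h1 : m1 < vals.length) (h2 : m2 < vals.length),
      vals[m1] = vals[m2] → m1 = m2 := by
    intro m1 m2 h1 h2 he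
    have a1 := hnd.idxOf_getElem m1 h1
    have a2 := hnd.idxOf_getElem m2 h2
    rw [he] at a1
    exact a1.symm.trans a2
  obtain ⟨hLle, hLgt, hLlen⟩ := bBisect_full vals (idx - t) (hlt.imp le_of_lt)
  obtain ⟨hHle, hHgt, hHlen⟩ := bBisect_full vals idx (hlt.imp le_of_lt)
  set L := bBisect vals (idx - t) 0 vals.length with hLdef
  set H := bBisect vals idx 0 vals.length with hHdef
  have hcast : (fun (bb : Int × Int) (j : Int) =>
      if PySem.List.pyGetD p j 0 < bb.1 then (PySem.List.pyGetD p j 0, j) else bb)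
      = selStep (fun j => PySem.List.pyGetD p j 0) := rfl
  -- range membership characterisation
  have hrng : ∀ j : Int, j ∈ PySem.List.pyRange (L : Int) (H : Int) 1 ↔
      ∃ (m : Nat) (hm : m < vals.length),
        j = (m : Int) ∧ idx - t < vals[m] ∧ vals[m] ≤ idx := by
    intro j
    rw [PySem.List.mem_pyRange_one]
    constructor
    · rintro ⟨hjl, hjh⟩
      have hj0 : 0 ≤ j := le_trans (by positivity) hjl
      refine ⟨j.toNat, by omega, by omega, ?_, ?_⟩
      · exact hLgt j.toNat (by omega) (by omega)
      · exact hHle j.toNat (by omega) (by omega)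
    · rintro ⟨m, hm, rfl, hwl, hwh⟩
      constructor
      · by_contra hcon
        push_neg at hcon
        have : m < L := by exact_mod_cast hcon
        exact absurd (hLle m hm this) (by omega)
      · by_contra hcon
        push_neg at hcon
        have : H ≤ m := by exact_mod_cast hcon
        exact absurd (hHgt m hm this) (by omega)
  -- value of B's table at a valid index
  have hg : ∀ m (hm : m < vals.length),
      PySem.List.pyGetD p ((m : Nat) : Int) 0 =
        if vals[m] ∈ claimed then (o.length : Int) else (List.idxOf vals[m] o : Int) := by
    intro m hm
    rw [PySem.List.pyGetD_natCast]
    exact hp m hm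
  cases hfind : aFind claimed o idx t with
  | none =>
    refine ⟨none, claimed, p, ?_, ?_, ⟨hlen, hp⟩⟩
    · simp [aStep, hfind]
    · have hall := (aFind_eq_none_iff claimed o idx t).mp hfind
      have hnone : ∀ j ∈ PySem.List.pyRange (L : Int) (H : Int) 1,
          ¬ PySem.List.pyGetD p j 0 < (((o.length : Int), (-1 : Int))).1 := by
        intro j hj
        obtain ⟨m, hm, rfl, hwl, hwh⟩ := (hrng j).mp hj
        rw [hg m hm]
        by_cases hc : vals[m] ∈ claimed
        · simp [hc]
        · exfalso
          exact hall vals[m] ((hvm _).mp (vals.getElem_mem hm)) ⟨hc, hwh, by omega⟩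
      have hsel := sel_none (fun j => PySem.List.pyGetD p j 0) _ ((o.length : Int), -1) hnone
      simp only [bStep]
      rw [hcast, ← hLdef, ← hHdef, hsel]
      norm_num
  | some v =>
    obtain ⟨hvo, ⟨hvc, hwl, hwh⟩, hmin⟩ := aFind_some_spec claimed o idx t v hfind
    have hvv : v ∈ vals := (hvm v).mpr hvo
    obtain ⟨hjv, hvjv⟩ := getElem_idxOf_mem vals v hvv
    set jv := List.idxOf v vals with hjvdef
    have hmemr : ((jv : Nat) : Int) ∈ PySem.List.pyRange (L : Int) (H : Int) 1 := by
      rw [hrng]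
      exact ⟨jv, hjv, rfl, by rw [hvjv]; omega, by rw [hvjv]; exact hwl⟩
    have hgstar : PySem.List.pyGetD p ((jv : Nat) : Int) 0 = (List.idxOf v o : Int) := by
      rw [hg jv hjv, hvjv, if_neg hvc]
    have hio : List.idxOf v o < o.length := List.idxOf_lt_length_of_mem hvo
    obtain ⟨_, hvoe⟩ := getElem_idxOf_mem o v hvo
    have hsel := sel_some (fun j => PySem.List.pyGetD p j 0)
      (PySem.List.pyRange (L : Int) (H : Int) 1) ((jv : Nat) : Int)
      ((o.length : Int), -1) hmemr
      (by
        show PySem.List.pyGetD p ((jv : Nat) : Int) 0 < (((o.length : Int), (-1 : Int))).1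
        rw [hgstar]
        show (List.idxOf v o : Int) < ((o.length : Int))
        exact_mod_cast hio)
      (by
        intro j hj hne
        obtain ⟨m, hm, rfl, hwl', hwh'⟩ := (hrng j).mp hj
        have hmne : m ≠ jv := fun e => hne (by rw [e])
        show PySem.List.pyGetD p ((jv : Nat) : Int) 0 < PySem.List.pyGetD p ((m : Nat) : Int) 0
        rw [hgstar, hg m hm]
        by_cases hc : vals[m] ∈ claimed
        · simp only [if_pos hc]
          exact_mod_cast hio
        · simp only [if_neg hc]
          have hmo : vals[m] ∈ o := (hvm _).mp (vals.getElem_mem hm)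
          have hle := hmin vals[m] hmo ⟨hc, hwh', by omega⟩
          obtain ⟨him, hime⟩ := getElem_idxOf_mem o vals[m] hmo
          have hne2 : List.idxOf v o ≠ List.idxOf vals[m] o := by
            intro he
            have hveq : v = vals[m] := by
              rw [← hvoe, ← hime]
              congr 1
            have : vals[m] = vals[jv] := by rw [← hveq, hvjv]
            exact hmne (hinj m jv hm hjv this)
          have : List.idxOf v o < List.idxOf vals[m] o := lt_of_le_of_ne hle hne2
          exact_mod_cast this)
    refine ⟨some v, PySem.Set.add claimed v, p.set jv (o.length : Int), ?_, ?_, ?_⟩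
    · simp [aStep, hfind]
    · simp only [bStep]
      rw [hcast, ← hLdef, ← hHdef, hsel]
      rw [if_pos (show ((List.idxOf v o : Int), ((jv : Nat) : Int)).2 ≥ 0 by positivity)]
      show (PySem.List.pySetD p ((jv : Nat) : Int) (o.length : Int),
            acc ++ [some (PySem.List.pyGetD vals ((jv : Nat) : Int) 0)]) =
           (p.set jv (o.length : Int), acc ++ [some v])
      rw [PySem.List.pySetD_natCast, PySem.List.pyGetD_natCast,
          getD_eq_getElem' vals jv 0 hjv, hvjv]
    · constructor
      · rw [List.length_set]
        exact hlen
      · intro j hj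
        by_cases hjj : j = jv
        · subst hjj
          rw [getD_eq_getElem' _ _ _ (by rw [List.length_set]; omega),
              List.getElem_set_self, hvjv, if_pos (by rw [PySem.Set.mem_add]; right; rfl)]
        · have hjlen : j < p.length := by omega
          rw [getD_eq_getElem' _ _ _ (by rw [List.length_set]; omega),
              List.getElem_set_ne (by omega)]
          rw [← getD_eq_getElem' p j 0 hjlen, hp j hj]
          have hne : vals[j] ≠ v := by
            intro he
            exact hjj (hinj j jv hj hjv (by rw [he, ← hvjv]))
          by_cases hc : vals[j] ∈ claimed
          · rw [if_pos hc, if_pos (by rw [PySem.Set.mem_add]; left; exact hc)]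
          · rw [if_neg hc, if_neg (by
              rw [PySem.Set.mem_add]
              rintro (h | h)
              · exact hc h
              · exact hne h)]

-- the two main folds agree
theorem main_fold (o : List Int) (t : Int) (vals : List Int)
    (hlt : vals.Pairwise (· < ·)) (hvm : ∀ v, v ∈ vals ↔ v ∈ o) :
    ∀ (alarms : List Int) (claimed : PySem.Set Int) (p : List Int) (acc : List (Option Int)),
      BInv o vals claimed p →
      (alarms.foldl (aStep o t) (claimed, acc)).2 =
      (alarms.foldl (bStep vals (o.length : Int) t) (p, acc)).2 := by
  intro alarms
  induction alarms with
  | nil => intro claimed p acc _; rfl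
  | cons idx rest ih =>
    intro claimed p acc hinv
    obtain ⟨out, claimed', p', hA, hB, hinv'⟩ :=
      step_eq o t vals hlt hvm claimed p idx acc hinv
    rw [List.foldl_cons, List.foldl_cons, hA, hB]
    exact ih claimed' p' (acc ++ [out]) hinv'

-- ===== VERDICT (by name: the statement is the Claim_ definition above) =====
theorem match_alarms_to_onsets_py_spec : Claim_equal_match_alarms_to_onsets_py := by
  intro alarms o t _dom
  unfold Spec_match_alarms_to_onsets_py
  -- name the pieces of B
  have hBdef : match_alarms_to_onsets_py_alt alarms o t =
      (let first_pos := (PySem.List.enumerate o).foldl fpStep PySem.Dict.empty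
       let vals := PySem.List.sorted (PySem.Dict.keys first_pos) (fun v => v)
       let pos := vals.map (fun v => PySem.Dict.getD first_pos v 0)
       (alarms.foldl (bStep vals (o.length : Int) t) (pos, [])).2) := rfl
  rw [hBdef]
  set first_pos := (PySem.List.enumerate o).foldl fpStep PySem.Dict.empty with hfp
  have hkeys : first_pos.keys = PySem.Set.ofList o := by
    rw [hfp, fp_keys]
    simp [PySem.Dict.keys_empty, PySem.Set.update_nil_left]
  set vals := PySem.List.sorted (PySem.Dict.keys first_pos) (fun v => v) with hvals
  have hvalseq : vals = PySem.List.sorted (PySem.Set.ofList o) (fun v => v) := by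
    rw [hvals, hkeys]
  have hlt : vals.Pairwise (· < ·) := by
    rw [hvalseq]; exact PySem.List.sorted_ofList_pairwise_lt o
  have hvm : ∀ v, v ∈ vals ↔ v ∈ o := by
    intro v
    rw [hvalseq, PySem.List.mem_sorted, PySem.Set.mem_ofList]
  have hget : ∀ v ∈ o, PySem.Dict.getD first_pos v 0 = (o.idxOf v : Int) := by
    intro v hv
    rw [hfp, PySem.Dict.getD_eq_get?_getD, fp_get?]
    rw [if_neg (by simp [PySem.Dict.contains_empty])]
    rw [index?_of_mem o v hv]
    simp
  have hinv0 : BInv o vals PySem.Set.empty (vals.map (fun v => PySem.Dict.getD first_pos v 0)) := by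
    constructor
    · simp
    · intro j hj
      rw [getD_eq_getElem' _ _ _ (by simpa using hj), List.getElem_map]
      rw [if_neg (by simp [PySem.Set.empty])]
      exact hget vals[j] ((hvm _).mp (vals.getElem_mem hj))
  have hAdef : match_alarms_to_onsets_py alarms o t =
      (alarms.foldl (aStep o t) (PySem.Set.empty, [])).2 := rfl
  rw [hAdef]
  exact main_fold o t vals hlt hvm alarms PySem.Set.empty _ [] hinv0
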